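-- pv_equiv track=rewrite | github.com/hhebb/algorithm | week_7/파괴되지 않은 건물.py | solution
-- ===== SOURCE A (Python) =====
-- def solution(board, skill):
--     cumulated = [[0] * (len(board[0]) + 1) for row in range(len(board) + 1)]
--     for t, r1, c1, r2, c2, degree in skill:
--         if t == 1:
--             cumulated[r1][c1] -= degree
--             cumulated[r1][c2 + 1] += degree
--             cumulated[r2 + 1][c1] += degree
--             cumulated[r2 + 1][c2 + 1] -= degree
--         elif t == 2:
--             cumulated[r1][c1] += degree
--             cumulated[r1][c2 + 1] -= degree
--             cumulated[r2 + 1][c1] -= degree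
--             cumulated[r2 + 1][c2 + 1] += degree
--
--     for r in range(len(board)):
--         for c in range(1, len(board[0])):
--             cumulated[r][c] += cumulated[r][c - 1]
--
--     for c in range(len(board[0])):
--         for r in range(1, len(board)):
--             cumulated[r][c] += cumulated[r - 1][c]
--
--     for r in range(len(board)):
--         for c in range(len(board[0])):
--             board[r][c] += cumulated[r][c]
--
--     c = [len(list(filter(lambda x: x > 0, row))) for row in board]
--     return sum(c)
-- ===== SOURCE B (Python) =====
-- def cell_value(skill, ri, ci, x):
--     v = x
--     for t, r1, c1, r2, c2, degree in skill:
--         if r1 <= ri <= r2 and c1 <= ci <= c2: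
--             if t == 1:
--                 v -= degree
--             elif t == 2:
--                 v += degree
--     return v
--
--
-- def solution(board, skill):
--     total = 0
--     for ri in range(len(board)):
--         row = board[ri]
--         for ci in range(len(row)):
--             if cell_value(skill, ri, ci, row[ci]) > 0:
--                 total += 1
--     return total
-- ===== Notes on version B (the rewrite author's own statement) =====
-- stated objective: simpler
-- what changed: A builds a 2D difference grid, runs row and column prefix-sum passes, adds it into the board and counts; B computes each cell's final durability directly by summing the skills whose rectangle covers that cell (no auxiliary grid, no mutation of board).
-- outside the precondition, e.g. on solution([[0]], [[1, -1, 0, -1, 0, 1]]): A returns 1, B returns 0; on solution([[0], [0], [0]], [[1, 2, 0, 0, 0, 5]]): A returns 1, B returns 0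
import Mathlib
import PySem

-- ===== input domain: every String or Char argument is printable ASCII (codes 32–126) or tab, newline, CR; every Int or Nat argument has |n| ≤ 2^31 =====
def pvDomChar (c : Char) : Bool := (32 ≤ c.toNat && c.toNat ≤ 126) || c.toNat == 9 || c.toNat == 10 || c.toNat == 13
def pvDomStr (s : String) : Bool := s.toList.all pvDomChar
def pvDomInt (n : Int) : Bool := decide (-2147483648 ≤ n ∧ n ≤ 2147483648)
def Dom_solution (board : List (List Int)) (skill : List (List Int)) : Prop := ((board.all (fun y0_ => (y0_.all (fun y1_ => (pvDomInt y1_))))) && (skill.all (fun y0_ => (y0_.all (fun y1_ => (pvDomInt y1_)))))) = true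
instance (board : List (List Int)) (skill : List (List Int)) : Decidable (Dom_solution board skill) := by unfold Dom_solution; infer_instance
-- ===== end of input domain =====

-- B replaces A's difference-grid + prefix-sum passes by a direct per-cell sum over the covering skills
-- (simpler, no auxiliary grid); A mutates `board` in place, B does not: the equivalence proved is about the return value.


-- ===== PORT A =====
-- grid read g[r][c] / write g[r][c] = v: exact for the nonnegative in-range indices Pre_ guarantees
def gGet (g : List (List Int)) (r c : Int) : Int := (g.getD r.natAbs []).getD c.natAbs 0
def gSet (g : List (List Int)) (r c : Int) (v : Int) : List (List Int) :=
  g.set r.natAbs ((g.getD r.natAbs []).set c.natAbs v)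
def gAdd (g : List (List Int)) (r c v : Int) : List (List Int) := gSet g r c (gGet g r c + v)

-- one iteration of A's first loop: unpack `t, r1, c1, r2, c2, degree = s` and place the four corner deltas
def applySkill (g : List (List Int)) (s : List Int) : List (List Int) :=
  match s with
  | [t, r1, c1, r2, c2, d] =>
    if t = 1 then
      gAdd (gAdd (gAdd (gAdd g r1 c1 (-d)) r1 (c2 + 1) d) (r2 + 1) c1 d) (r2 + 1) (c2 + 1) (-d)
    else if t = 2 then
      gAdd (gAdd (gAdd (gAdd g r1 c1 d) r1 (c2 + 1) (-d)) (r2 + 1) c1 (-d)) (r2 + 1) (c2 + 1) d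
    else g
  | _ => g   -- tuple unpacking raises ValueError unless the row has length 6: outside Pre_

def solution (board : List (List Int)) (skill : List (List Int)) : Int :=
  let R : Int := board.length
  let C : Int := (PySem.List.pyGetD board 0 []).length   -- len(board[0]); board = [] raises: outside Pre_
  let cum0 := List.replicate (board.length + 1) (List.replicate ((PySem.List.pyGetD board 0 []).length + 1) (0 : Int))
  let cum1 := skill.foldl applySkill cum0
  let cum2 := (PySem.List.pyRange 0 R 1).foldl
    (fun g r => (PySem.List.pyRange 1 C 1).foldl (fun g c => gAdd g r c (gGet g r (c - 1))) g) cum1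
  let cum3 := (PySem.List.pyRange 0 C 1).foldl
    (fun g c => (PySem.List.pyRange 1 R 1).foldl (fun g r => gAdd g r c (gGet g (r - 1) c)) g) cum2
  let b2 := (PySem.List.pyRange 0 R 1).foldl
    (fun b r => (PySem.List.pyRange 0 C 1).foldl (fun b c => gAdd b r c (gGet cum3 r c)) b) board
  ((b2.map (fun row => (((row.filter (fun x => decide (x > 0))).length : Nat) : Int))).sum)

-- ===== PORT B =====
-- Source B's cell_value: fold the skill list over one cell's durability
def cellVal (skill : List (List Int)) (ri ci x : Int) : Int :=
  skill.foldl (fun v s =>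
    match s with
    | [t, r1, c1, r2, c2, d] =>
      if r1 ≤ ri ∧ ri ≤ r2 ∧ c1 ≤ ci ∧ ci ≤ c2 then
        if t = 1 then v - d else if t = 2 then v + d else v
      else v
    | _ => v) x   -- length ≠ 6 raises in Python: outside Pre_

def solution_alt (board : List (List Int)) (skill : List (List Int)) : Int :=
  (PySem.List.pyRange 0 (board.length : Int) 1).foldl (fun total ri =>
    let row := PySem.List.pyGetD board ri []
    (PySem.List.pyRange 0 (row.length : Int) 1).foldl (fun total ci =>
      if cellVal skill ri ci (PySem.List.pyGetD row ci 0) > 0 then total + 1 else total) total) 0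

-- ===== PRECONDITION & SPEC =====
-- Pre_ excludes: the empty board and boards with a row shorter than board[0] (A raises IndexError),
-- skill rows not of length 6 (unpacking raises ValueError), and skills with t ∈ {1,2} whose rectangle is not
-- 0 ≤ r1 ≤ r2 < len(board), 0 ≤ c1 ≤ c2 < len(board[0]): there negative indices wrap around A's difference
-- grid and inverted rectangles leave a negated band — accidents of the difference-array layout.
def Pre_solution (board : List (List Int)) (skill : List (List Int)) : Prop :=
  board ≠ [] ∧
  (∀ row ∈ board, (board.headD []).length ≤ row.length) ∧
  (∀ s ∈ skill, s.length = 6 ∧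
    ((s.getD 0 0 = 1 ∨ s.getD 0 0 = 2) →
      0 ≤ s.getD 1 0 ∧ s.getD 1 0 ≤ s.getD 3 0 ∧ s.getD 3 0 < (board.length : Int) ∧
      0 ≤ s.getD 2 0 ∧ s.getD 2 0 ≤ s.getD 4 0 ∧ s.getD 4 0 < ((board.headD []).length : Int)))
instance (board : List (List Int)) (skill : List (List Int)) : Decidable (Pre_solution board skill) := by
  unfold Pre_solution; infer_instance

def pvWitness_solution : List (List Int) × List (List Int) :=
  ([[1, -2], [3, 4]], [[1, 0, 0, 1, 1, 2], [2, 0, 1, 1, 1, 1]])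

def Spec_solution (board : List (List Int)) (skill : List (List Int)) (out : Int) : Prop := out = solution_alt board skill
instance (board : List (List Int)) (skill : List (List Int)) (out : Int) : Decidable (Spec_solution board skill out) := by unfold Spec_solution; infer_instance

-- ===== CLAIM (what is proved, stated in full; the proofs are below) =====
def Claim_equal_solution : Prop := ∀ (board : List (List Int)) (skill : List (List Int)), Dom_solution board skill → Pre_solution board skill → Spec_solution board skill (solution board skill)

-- ===== LEMMAS AND PROOFS =====

def Mg (g : List (List Int)) (r c : Nat) : Int := (g.getD r []).getD c 0

theorem gGet_eq_Mg (g : List (List Int)) (r c : Int) : gGet g r c = Mg g r.natAbs c.natAbs := rfl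

theorem getD_set_self {α : Type} (l : List α) (i : Nat) (x d : α) (h : i < l.length) :
    (l.set i x).getD i d = x := by
  rw [List.getD_eq_getElem?_getD,
    List.getElem?_eq_getElem (show i < (l.set i x).length by simpa using h),
    List.getElem_set_self (by simpa using h)]
  rfl

theorem getD_set_ne {α : Type} (l : List α) (i r : Nat) (x d : α) (h : r ≠ i) :
    (l.set i x).getD r d = l.getD r d := by
  simp [List.getD_eq_getElem?_getD, List.getElem?_set_ne (Ne.symm h)]

theorem length_gAdd (g : List (List Int)) (r c v : Int) : (gAdd g r c v).length = g.length := by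
  simp [gAdd, gSet]

theorem rowlen_gAdd (g : List (List Int)) (r c v : Int) (i : Nat) :
    ((gAdd g r c v).getD i []).length = (g.getD i []).length := by
  unfold gAdd gSet
  by_cases h : i = r.natAbs
  · subst h
    by_cases hlt : r.natAbs < g.length
    · rw [getD_set_self _ _ _ _ hlt]; simp
    · rw [List.set_eq_of_length_le (by omega)]
  · rw [getD_set_ne _ _ _ _ _ h]

theorem Mg_gAdd (g : List (List Int)) (i j v : Int) (r c : Nat)
    (hi : i.natAbs < g.length) (hj : j.natAbs < (g.getD i.natAbs []).length) :
    Mg (gAdd g i j v) r c = if r = i.natAbs ∧ c = j.natAbs then Mg g r c + v else Mg g r c := by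
  unfold Mg gAdd gSet gGet
  by_cases hr : r = i.natAbs
  · subst hr
    rw [getD_set_self _ _ _ _ hi]
    by_cases hc : c = j.natAbs
    · subst hc
      rw [if_pos (And.intro rfl rfl), getD_set_self _ _ _ _ hj]
    · rw [if_neg (by tauto), getD_set_ne _ _ _ _ _ hc]
  · rw [getD_set_ne _ _ _ _ _ hr, if_neg (by tauto)]

theorem foldl_pyRange_induct {σ : Type} (step : σ → Int → σ) (P : Nat → σ → Prop)
    (a n : Nat) (han : a ≤ n) (g0 : σ) (h0 : P a g0)
    (hstep : ∀ (m : Nat) (g : σ), a ≤ m → m < n → P m g → P (m + 1) (step g (m : Int))) :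
    P n (((PySem.List.pyRange (a : Int) (n : Int) 1).foldl step g0)) := by
  induction n, han using Nat.le_induction with
  | base =>
    rw [PySem.List.pyRange_one_eq_nil (le_refl _)]; exact h0
  | succ n hn ih =>
    have : ((n + 1 : Nat) : Int) = (n : Int) + 1 := by push_cast; ring
    rw [this, PySem.List.pyRange_one_succ_right (by exact_mod_cast hn), List.foldl_append]
    exact hstep n _ hn (by omega) (ih (fun m g ham hm hp => hstep m g ham (by omega) hp))

def Shape (R C : Nat) (g : List (List Int)) : Prop :=
  g.length = R + 1 ∧ ∀ i : Nat, i < R + 1 → (g.getD i []).length = C + 1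

theorem Shape_gAdd (R C : Nat) (g : List (List Int)) (r c v : Int) (h : Shape R C g) :
    Shape R C (gAdd g r c v) := by
  obtain ⟨h1, h2⟩ := h
  exact ⟨by rw [length_gAdd]; exact h1, fun i hi => by rw [rowlen_gAdd]; exact h2 i hi⟩

-- inner row pass: for row r, prefix-sum columns 1..C-1
theorem rowpass_inner (R C : Nat) (r : Nat) (hr : r < R) (h : List (List Int)) (hs : Shape R C h) :
    Shape R C (((PySem.List.pyRange 1 (C : Int) 1).foldl (fun g c => gAdd g (r : Int) c (gGet g (r : Int) (c - 1))) h)) ∧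
    (∀ ρ γ : Nat, ρ < R + 1 → γ < C + 1 →
      Mg (((PySem.List.pyRange 1 (C : Int) 1).foldl (fun g c => gAdd g (r : Int) c (gGet g (r : Int) (c - 1))) h)) ρ γ =
        if ρ = r ∧ γ < C then ∑ j ∈ Finset.range (γ + 1), Mg h ρ j else Mg h ρ γ) := by
  rcases Nat.eq_zero_or_pos C with h0 | hC
  · subst h0
    rw [show ((0 : Nat) : Int) = 0 from rfl, PySem.List.pyRange_one_eq_nil (by omega), List.foldl_nil]
    exact ⟨hs, fun ρ γ h1 h2 => by rw [if_neg (by omega)]⟩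
  have key := foldl_pyRange_induct (fun g c => gAdd g (r : Int) c (gGet g (r : Int) (c - 1)))
    (fun m g' => Shape R C g' ∧ ∀ ρ γ : Nat, ρ < R + 1 → γ < C + 1 →
      Mg g' ρ γ = if ρ = r ∧ γ < m then ∑ j ∈ Finset.range (γ + 1), Mg h ρ j else Mg h ρ γ)
    1 C hC h ?base ?step
  · obtain ⟨k1, k2⟩ := key
    refine ⟨k1, fun ρ γ h1 h2 => ?_⟩
    exact k2 ρ γ h1 h2
  case base =>
    refine ⟨hs, fun ρ γ h1 h2 => ?_⟩
    split_ifs with hcond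
    · obtain ⟨rfl, hγ⟩ := hcond
      interval_cases γ
      simp
    · rfl
  case step =>
    rintro m g hm1 hm2 ⟨hsg, hval⟩
    refine ⟨Shape_gAdd R C g _ _ _ hsg, fun ρ γ h1 h2 => ?_⟩
    have hin1 : ((r : Int)).natAbs < g.length := by rw [hsg.1]; omega
    have hin2 : ((m : Int)).natAbs < (g.getD ((r : Int)).natAbs []).length := by
      rw [show ((r : Int)).natAbs = r by omega, hsg.2 r (by omega)]; omega
    rw [Mg_gAdd g _ _ _ ρ γ hin1 hin2, gGet_eq_Mg,
        show ((r : Int)).natAbs = r by omega, show ((m : Int)).natAbs = m by omega,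
        show ((m : Int) - 1).natAbs = m - 1 by omega]
    by_cases hc : ρ = r ∧ γ = m
    · obtain ⟨rfl, rfl⟩ := hc
      rw [if_pos ⟨rfl, rfl⟩, hval ρ γ h1 h2, hval ρ (γ - 1) h1 (by omega),
          if_neg (show ¬(ρ = ρ ∧ γ < γ) from fun hh => absurd hh.2 (lt_irrefl γ)),
          if_pos ⟨rfl, show γ - 1 < γ by omega⟩,
          if_pos ⟨rfl, show γ < γ + 1 by omega⟩]
      have e0 : γ - 1 + 1 = γ := by omega
      rw [e0, Finset.sum_range_succ]
      exact add_comm _ _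
    · rw [if_neg hc, hval ρ γ h1 h2]
      by_cases hd : ρ = r ∧ γ < m
      · rw [if_pos hd, if_pos ⟨hd.1, by omega⟩]
      · rw [if_neg hd, if_neg (by omega)]

-- inner column pass: for column c, prefix-sum rows 1..R-1
theorem colpass_inner (R C : Nat) (c : Nat) (hc : c < C) (h : List (List Int)) (hs : Shape R C h) (hR : 1 ≤ R) :
    Shape R C (((PySem.List.pyRange 1 (R : Int) 1).foldl (fun g r => gAdd g r (c : Int) (gGet g (r - 1) (c : Int))) h)) ∧
    (∀ ρ γ : Nat, ρ < R + 1 → γ < C + 1 →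
      Mg (((PySem.List.pyRange 1 (R : Int) 1).foldl (fun g r => gAdd g r (c : Int) (gGet g (r - 1) (c : Int))) h)) ρ γ =
        if γ = c ∧ ρ < R then ∑ i ∈ Finset.range (ρ + 1), Mg h i γ else Mg h ρ γ) := by
  have key := foldl_pyRange_induct (fun g r => gAdd g r (c : Int) (gGet g (r - 1) (c : Int)))
    (fun m g' => Shape R C g' ∧ ∀ ρ γ : Nat, ρ < R + 1 → γ < C + 1 →
      Mg g' ρ γ = if γ = c ∧ ρ < m then ∑ i ∈ Finset.range (ρ + 1), Mg h i γ else Mg h ρ γ)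
    1 R hR h ?base ?step
  · exact ⟨key.1, fun ρ γ h1 h2 => key.2 ρ γ h1 h2⟩
  case base =>
    refine ⟨hs, fun ρ γ h1 h2 => ?_⟩
    split_ifs with hcond
    · obtain ⟨rfl, hρ⟩ := hcond
      interval_cases ρ
      simp
    · rfl
  case step =>
    rintro m g hm1 hm2 ⟨hsg, hval⟩
    refine ⟨Shape_gAdd R C g _ _ _ hsg, fun ρ γ h1 h2 => ?_⟩
    have hin1 : ((m : Int)).natAbs < g.length := by rw [hsg.1]; omega
    have hin2 : ((c : Int)).natAbs < (g.getD ((m : Int)).natAbs []).length := by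
      rw [show ((m : Int)).natAbs = m by omega, hsg.2 m (by omega)]; omega
    rw [Mg_gAdd g _ _ _ ρ γ hin1 hin2, gGet_eq_Mg,
        show ((c : Int)).natAbs = c by omega, show ((m : Int)).natAbs = m by omega,
        show ((m : Int) - 1).natAbs = m - 1 by omega]
    by_cases hcnd : ρ = m ∧ γ = c
    · obtain ⟨rfl, rfl⟩ := hcnd
      rw [if_pos ⟨rfl, rfl⟩, hval ρ γ h1 h2, hval (ρ - 1) γ (by omega) h2,
          if_neg (show ¬(γ = γ ∧ ρ < ρ) from fun hh => absurd hh.2 (lt_irrefl ρ)),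
          if_pos ⟨rfl, show ρ - 1 < ρ by omega⟩,
          if_pos ⟨rfl, show ρ < ρ + 1 by omega⟩]
      have e0 : ρ - 1 + 1 = ρ := by omega
      rw [e0, Finset.sum_range_succ]
      exact add_comm _ _
    · rw [if_neg hcnd, hval ρ γ h1 h2]
      by_cases hd : γ = c ∧ ρ < m
      · rw [if_pos hd, if_pos ⟨hd.1, by omega⟩]
      · rw [if_neg hd, if_neg (by omega)]

theorem rowpass (R C : Nat) (g0 : List (List Int)) (hs : Shape R C g0) :
    Shape R C ((PySem.List.pyRange 0 (R : Int) 1).foldl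
      (fun g r => (PySem.List.pyRange 1 (C : Int) 1).foldl (fun g c => gAdd g r c (gGet g r (c - 1))) g) g0) ∧
    (∀ ρ γ : Nat, ρ < R + 1 → γ < C + 1 →
      Mg ((PySem.List.pyRange 0 (R : Int) 1).foldl
        (fun g r => (PySem.List.pyRange 1 (C : Int) 1).foldl (fun g c => gAdd g r c (gGet g r (c - 1))) g) g0) ρ γ =
        if ρ < R ∧ γ < C then ∑ j ∈ Finset.range (γ + 1), Mg g0 ρ j else Mg g0 ρ γ) := by
  have key := foldl_pyRange_induct
    (fun g r => (PySem.List.pyRange 1 (C : Int) 1).foldl (fun g c => gAdd g r c (gGet g r (c - 1))) g)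
    (fun k g' => Shape R C g' ∧ ∀ ρ γ : Nat, ρ < R + 1 → γ < C + 1 →
      Mg g' ρ γ = if ρ < k ∧ γ < C then ∑ j ∈ Finset.range (γ + 1), Mg g0 ρ j else Mg g0 ρ γ)
    0 R (Nat.zero_le R) g0 ?base ?step
  · rw [show ((0 : Nat) : Int) = 0 from rfl] at key
    exact key
  case base =>
    exact ⟨hs, fun ρ γ h1 h2 => by rw [if_neg (by omega)]⟩
  case step =>
    rintro m g hm1 hm2 ⟨hsg, hval⟩
    have inner := rowpass_inner R C m hm2 g hsg
    refine ⟨inner.1, fun ρ γ h1 h2 => ?_⟩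
    rw [inner.2 ρ γ h1 h2]
    by_cases hc : ρ = m ∧ γ < C
    · obtain ⟨rfl, hγ⟩ := hc
      rw [if_pos ⟨rfl, hγ⟩, if_pos ⟨by omega, hγ⟩]
      refine Finset.sum_congr rfl (fun j hj => ?_)
      have hjC : j < C + 1 := by
        have := Finset.mem_range.mp hj
        omega
      rw [hval ρ j h1 hjC, if_neg (by omega)]
    · rw [if_neg hc, hval ρ γ h1 h2]
      by_cases hd : ρ < m ∧ γ < C
      · rw [if_pos hd, if_pos ⟨by omega, hd.2⟩]
      · rw [if_neg hd, if_neg (by omega)]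

theorem colpass (R C : Nat) (hR : 1 ≤ R) (g0 : List (List Int)) (hs : Shape R C g0) :
    Shape R C ((PySem.List.pyRange 0 (C : Int) 1).foldl
      (fun g c => (PySem.List.pyRange 1 (R : Int) 1).foldl (fun g r => gAdd g r c (gGet g (r - 1) c)) g) g0) ∧
    (∀ ρ γ : Nat, ρ < R + 1 → γ < C + 1 →
      Mg ((PySem.List.pyRange 0 (C : Int) 1).foldl
        (fun g c => (PySem.List.pyRange 1 (R : Int) 1).foldl (fun g r => gAdd g r c (gGet g (r - 1) c)) g) g0) ρ γ =
        if ρ < R ∧ γ < C then ∑ i ∈ Finset.range (ρ + 1), Mg g0 i γ else Mg g0 ρ γ) := by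
  have key := foldl_pyRange_induct
    (fun g c => (PySem.List.pyRange 1 (R : Int) 1).foldl (fun g r => gAdd g r c (gGet g (r - 1) c)) g)
    (fun k g' => Shape R C g' ∧ ∀ ρ γ : Nat, ρ < R + 1 → γ < C + 1 →
      Mg g' ρ γ = if ρ < R ∧ γ < k then ∑ i ∈ Finset.range (ρ + 1), Mg g0 i γ else Mg g0 ρ γ)
    0 C (Nat.zero_le C) g0 ?base ?step
  · rw [show ((0 : Nat) : Int) = 0 from rfl] at key
    exact ⟨key.1, fun ρ γ h1 h2 => key.2 ρ γ h1 h2⟩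
  case base =>
    exact ⟨hs, fun ρ γ h1 h2 => by rw [if_neg (by omega)]⟩
  case step =>
    rintro m g hm1 hm2 ⟨hsg, hval⟩
    have inner := colpass_inner R C m hm2 g hsg hR
    refine ⟨inner.1, fun ρ γ h1 h2 => ?_⟩
    rw [inner.2 ρ γ h1 h2]
    by_cases hc : γ = m ∧ ρ < R
    · obtain ⟨rfl, hρ⟩ := hc
      rw [if_pos ⟨rfl, hρ⟩, if_pos ⟨hρ, by omega⟩]
      refine Finset.sum_congr rfl (fun i hi => ?_)
      have hiR : i < R + 1 := by
        have := Finset.mem_range.mp hi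
        omega
      rw [hval i γ hiR h2, if_neg (by omega)]
    · rw [if_neg hc, hval ρ γ h1 h2]
      by_cases hd : ρ < R ∧ γ < m
      · rw [if_pos hd, if_pos ⟨hd.1, by omega⟩]
      · rw [if_neg hd, if_neg (by omega)]

def GoodSkill (R C : Nat) (s : List Int) : Prop :=
  s.length = 6 ∧ ((s.getD 0 0 = 1 ∨ s.getD 0 0 = 2) →
    0 ≤ s.getD 1 0 ∧ s.getD 1 0 ≤ s.getD 3 0 ∧ s.getD 3 0 < (R : Int) ∧
    0 ≤ s.getD 2 0 ∧ s.getD 2 0 ≤ s.getD 4 0 ∧ s.getD 4 0 < (C : Int))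

def dlt (t d : Int) : Int := if t = 1 then -d else if t = 2 then d else 0

def eff (s : List Int) (ri ci : Int) : Int :=
  match s with
  | [t, r1, c1, r2, c2, d] =>
    if r1 ≤ ri ∧ ri ≤ r2 ∧ c1 ≤ ci ∧ ci ≤ c2 then dlt t d else 0
  | _ => 0

def effD (s : List Int) (r c : Nat) : Int :=
  match s with
  | [t, r1, c1, r2, c2, d] =>
    (if (r : Int) = r1 ∧ (c : Int) = c1 then dlt t d else 0)
    - (if (r : Int) = r1 ∧ (c : Int) = c2 + 1 then dlt t d else 0)
    - (if (r : Int) = r2 + 1 ∧ (c : Int) = c1 then dlt t d else 0)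
    + (if (r : Int) = r2 + 1 ∧ (c : Int) = c2 + 1 then dlt t d else 0)
  | _ => 0

theorem Shape_applySkill (R C : Nat) (g : List (List Int)) (s : List Int) (hs : Shape R C g) :
    Shape R C (applySkill g s) := by
  unfold applySkill
  split
  · split_ifs
    · exact Shape_gAdd R C _ _ _ _ (Shape_gAdd R C _ _ _ _ (Shape_gAdd R C _ _ _ _ (Shape_gAdd R C _ _ _ _ hs)))
    · exact Shape_gAdd R C _ _ _ _ (Shape_gAdd R C _ _ _ _ (Shape_gAdd R C _ _ _ _ (Shape_gAdd R C _ _ _ _ hs)))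
    · exact hs
  · exact hs

theorem list_len6 {α : Type} (s : List α) (h : s.length = 6) :
    ∃ a b c d e f, s = [a, b, c, d, e, f] := by
  rcases s with _ | ⟨a, _ | ⟨b, _ | ⟨c, _ | ⟨d, _ | ⟨e, _ | ⟨f, _ | ⟨g, t⟩⟩⟩⟩⟩⟩⟩ <;> simp_all

theorem Mg_gAdd' (R C : Nat) (g : List (List Int)) (hs : Shape R C g) (i j v : Int)
    (hi : i.natAbs < R + 1) (hj : j.natAbs < C + 1) (r c : Nat) :
    Mg (gAdd g i j v) r c = if r = i.natAbs ∧ c = j.natAbs then Mg g r c + v else Mg g r c :=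
  Mg_gAdd g i j v r c (by rw [hs.1]; exact hi) (by rw [hs.2 _ hi]; exact hj)

set_option maxHeartbeats 2000000 in
theorem Mg_applySkill (R C : Nat) (g : List (List Int)) (s : List Int)
    (hs : Shape R C g) (hg : GoodSkill R C s) (r c : Nat) (h1 : r < R + 1) (h2 : c < C + 1) :
    Mg (applySkill g s) r c = Mg g r c + effD s r c := by
  obtain ⟨hlen, hbnd⟩ := hg
  obtain ⟨t, r1, c1, r2, c2, d, rfl⟩ := list_len6 s hlen
  simp only [List.getD_cons_zero, List.getD_cons_succ] at hbnd
  by_cases ht1 : t = 1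
  · obtain ⟨hb1, hb2, hb3, hb4, hb5, hb6⟩ := hbnd (Or.inl ht1)
    subst ht1
    simp only [applySkill, reduceIte]
    have e1 := Shape_gAdd R C g r1 c1 (-d) hs
    have e2 := Shape_gAdd R C _ r1 (c2 + 1) d e1
    have e3 := Shape_gAdd R C _ (r2 + 1) c1 d e2
    rw [Mg_gAdd' R C _ e3 (r2 + 1) (c2 + 1) (-d) (by omega) (by omega) r c,
        Mg_gAdd' R C _ e2 (r2 + 1) c1 d (by omega) (by omega) r c,
        Mg_gAdd' R C _ e1 r1 (c2 + 1) d (by omega) (by omega) r c,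
        Mg_gAdd' R C _ hs r1 c1 (-d) (by omega) (by omega) r c]
    have ce : ∀ (a b : Int), 0 ≤ a → 0 ≤ b → ((r = a.natAbs ∧ c = b.natAbs) ↔ ((r : Int) = a ∧ (c : Int) = b)) := by
      intro a b ha hb
      omega
    simp only [ce r1 c1 hb1 hb4, ce r1 (c2 + 1) hb1 (by omega), ce (r2 + 1) c1 (by omega) hb4,
      ce (r2 + 1) (c2 + 1) (by omega) (by omega)]
    simp only [effD, dlt, reduceIte]
    split_ifs <;> omega
  · by_cases ht2 : t = 2
    · obtain ⟨hb1, hb2, hb3, hb4, hb5, hb6⟩ := hbnd (Or.inr ht2)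
      subst ht2
      simp only [applySkill, reduceIte]
      rw [if_neg ht1]
      have e1 := Shape_gAdd R C g r1 c1 d hs
      have e2 := Shape_gAdd R C _ r1 (c2 + 1) (-d) e1
      have e3 := Shape_gAdd R C _ (r2 + 1) c1 (-d) e2
      rw [Mg_gAdd' R C _ e3 (r2 + 1) (c2 + 1) d (by omega) (by omega) r c,
          Mg_gAdd' R C _ e2 (r2 + 1) c1 (-d) (by omega) (by omega) r c,
          Mg_gAdd' R C _ e1 r1 (c2 + 1) (-d) (by omega) (by omega) r c,
          Mg_gAdd' R C _ hs r1 c1 d (by omega) (by omega) r c]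
      have ce : ∀ (a b : Int), 0 ≤ a → 0 ≤ b → ((r = a.natAbs ∧ c = b.natAbs) ↔ ((r : Int) = a ∧ (c : Int) = b)) := by
        intro a b ha hb
        omega
      simp only [ce r1 c1 hb1 hb4, ce r1 (c2 + 1) hb1 (by omega), ce (r2 + 1) c1 (by omega) hb4,
        ce (r2 + 1) (c2 + 1) (by omega) (by omega)]
      simp only [effD, dlt, reduceIte]
      split_ifs <;> omega
    · simp only [applySkill, if_neg ht1, if_neg ht2, effD, dlt]
      split_ifs <;> omega

theorem skillfold (R C : Nat) (sk : List (List Int)) :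
    ∀ (g : List (List Int)), Shape R C g → (∀ s ∈ sk, GoodSkill R C s) →
      Shape R C (sk.foldl applySkill g) ∧
      (∀ r c : Nat, r < R + 1 → c < C + 1 →
        Mg (sk.foldl applySkill g) r c = Mg g r c + (sk.map (fun s => effD s r c)).sum) := by
  induction sk with
  | nil => exact fun g hs _ => ⟨hs, fun r c h1 h2 => by simp⟩
  | cons s sk ih =>
    intro g hs hgood
    have hgs := hgood s (by simp)
    have ih' := ih (applySkill g s) (Shape_applySkill R C g s hs) (fun x hx => hgood x (by simp [hx]))
    refine ⟨ih'.1, fun r c h1 h2 => ?_⟩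
    rw [List.foldl_cons, ih'.2 r c h1 h2, Mg_applySkill R C g s hs hgs r c h1 h2]
    simp [add_assoc]

-- final pass: add q-values into the board
theorem addpass_inner (R C : Nat) (r : Nat) (hr : r < R) (q b0 : List (List Int))
    (hlen : b0.length = R) (hrow : ∀ i : Nat, i < R → C ≤ (b0.getD i []).length) :
    ((((PySem.List.pyRange 0 (C : Int) 1).foldl (fun b c => gAdd b (r : Int) c (gGet q (r : Int) c)) b0)).length = b0.length) ∧
    (∀ i : Nat, ((((PySem.List.pyRange 0 (C : Int) 1).foldl (fun b c => gAdd b (r : Int) c (gGet q (r : Int) c)) b0)).getD i []).length = (b0.getD i []).length) ∧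
    (∀ ρ γ : Nat,
      Mg (((PySem.List.pyRange 0 (C : Int) 1).foldl (fun b c => gAdd b (r : Int) c (gGet q (r : Int) c)) b0)) ρ γ =
        Mg b0 ρ γ + (if ρ = r ∧ γ < C then Mg q ρ γ else 0)) := by
  have key := foldl_pyRange_induct (fun b c => gAdd b (r : Int) c (gGet q (r : Int) c))
    (fun m b => b.length = b0.length ∧ (∀ i : Nat, (b.getD i []).length = (b0.getD i []).length) ∧
      (∀ ρ γ : Nat, Mg b ρ γ = Mg b0 ρ γ + (if ρ = r ∧ γ < m then Mg q ρ γ else 0)))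
    0 C (Nat.zero_le C) b0 ?base ?step
  · rw [show ((0 : Nat) : Int) = 0 from rfl] at key
    exact key
  case base =>
    exact ⟨rfl, fun i => rfl, fun ρ γ => by rw [if_neg (by omega)]; ring⟩
  case step =>
    rintro m b hm1 hm2 ⟨hb1, hb2, hb3⟩
    refine ⟨by rw [length_gAdd, hb1], fun i => by rw [rowlen_gAdd, hb2 i], fun ρ γ => ?_⟩
    have hin1 : ((r : Int)).natAbs < b.length := by rw [hb1, hlen]; omega
    have hin2 : ((m : Int)).natAbs < (b.getD ((r : Int)).natAbs []).length := by
      rw [show ((r : Int)).natAbs = r by omega, hb2 r]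
      have := hrow r hr
      omega
    rw [Mg_gAdd b _ _ _ ρ γ hin1 hin2, gGet_eq_Mg,
        show ((r : Int)).natAbs = r by omega, show ((m : Int)).natAbs = m by omega]
    by_cases hc : ρ = r ∧ γ = m
    · obtain ⟨rfl, rfl⟩ := hc
      rw [if_pos ⟨rfl, rfl⟩, hb3 ρ γ, if_neg (by omega), if_pos ⟨rfl, by omega⟩]
      ring
    · rw [if_neg hc, hb3 ρ γ]
      by_cases hd : ρ = r ∧ γ < m
      · rw [if_pos hd, if_pos ⟨hd.1, by omega⟩]
      · rw [if_neg hd, if_neg (by omega)]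

theorem addpass (R C : Nat) (q b0 : List (List Int))
    (hlen : b0.length = R) (hrow : ∀ i : Nat, i < R → C ≤ (b0.getD i []).length) :
    ((((PySem.List.pyRange 0 (R : Int) 1).foldl (fun b r => (PySem.List.pyRange 0 (C : Int) 1).foldl (fun b c => gAdd b r c (gGet q r c)) b) b0)).length = b0.length) ∧
    (∀ i : Nat, ((((PySem.List.pyRange 0 (R : Int) 1).foldl (fun b r => (PySem.List.pyRange 0 (C : Int) 1).foldl (fun b c => gAdd b r c (gGet q r c)) b) b0)).getD i []).length = (b0.getD i []).length) ∧
    (∀ ρ γ : Nat,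
      Mg (((PySem.List.pyRange 0 (R : Int) 1).foldl (fun b r => (PySem.List.pyRange 0 (C : Int) 1).foldl (fun b c => gAdd b r c (gGet q r c)) b) b0)) ρ γ =
        Mg b0 ρ γ + (if ρ < R ∧ γ < C then Mg q ρ γ else 0)) := by
  have key := foldl_pyRange_induct
    (fun b r => (PySem.List.pyRange 0 (C : Int) 1).foldl (fun b c => gAdd b r c (gGet q r c)) b)
    (fun k b => b.length = b0.length ∧ (∀ i : Nat, (b.getD i []).length = (b0.getD i []).length) ∧
      (∀ ρ γ : Nat, Mg b ρ γ = Mg b0 ρ γ + (if ρ < k ∧ γ < C then Mg q ρ γ else 0)))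
    0 R (Nat.zero_le R) b0 ?base ?step
  · rw [show ((0 : Nat) : Int) = 0 from rfl] at key
    exact key
  case base =>
    exact ⟨rfl, fun i => rfl, fun ρ γ => by rw [if_neg (by omega)]; ring⟩
  case step =>
    rintro m b hm1 hm2 ⟨hb1, hb2, hb3⟩
    have inner := addpass_inner R C m hm2 q b (by rw [hb1, hlen])
      (fun i hi => by rw [hb2 i]; exact hrow i hi)
    refine ⟨by rw [inner.1, hb1], fun i => by rw [inner.2.1 i, hb2 i], fun ρ γ => ?_⟩
    rw [inner.2.2 ρ γ, hb3 ρ γ]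
    by_cases hc : ρ = m ∧ γ < C
    · rw [if_pos hc, if_neg (by omega), if_pos ⟨by omega, hc.2⟩]
      ring
    · rw [if_neg hc]
      by_cases hd : ρ < m ∧ γ < C
      · rw [if_pos hd, if_pos ⟨by omega, hd.2⟩]
        ring
      · rw [if_neg hd, if_neg (by omega)]
        ring

theorem sum_point (n : Nat) (a δ : Int) (ha : 0 ≤ a) :
    (∑ i ∈ Finset.range n, if (i : Int) = a then δ else 0) = if a < (n : Int) then δ else 0 := by
  have h : ∀ i ∈ Finset.range n, (if (i : Int) = a then δ else 0) = if i = a.toNat then δ else 0 := by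
    intro i _
    exact if_congr (by omega) rfl rfl
  rw [Finset.sum_congr rfl h, Finset.sum_ite_eq' (Finset.range n) a.toNat (fun _ => δ)]
  exact if_congr (by rw [Finset.mem_range]; omega) rfl rfl

theorem sum2_point (n m : Nat) (a b δ : Int) (ha : 0 ≤ a) (hb : 0 ≤ b) :
    (∑ i ∈ Finset.range n, ∑ j ∈ Finset.range m, if (i : Int) = a ∧ (j : Int) = b then δ else 0) =
      if a < (n : Int) ∧ b < (m : Int) then δ else 0 := by
  have h : ∀ i ∈ Finset.range n,
      (∑ j ∈ Finset.range m, if (i : Int) = a ∧ (j : Int) = b then δ else 0) =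
        if (i : Int) = a then (if b < (m : Int) then δ else 0) else 0 := by
    intro i _
    by_cases hp : (i : Int) = a
    · have h2 : ∀ j ∈ Finset.range m, (if (i : Int) = a ∧ (j : Int) = b then δ else 0) = (if (j : Int) = b then δ else 0) :=
        fun j _ => if_congr ⟨fun h => h.2, fun h => ⟨hp, h⟩⟩ rfl rfl
      rw [Finset.sum_congr rfl h2, sum_point m b δ hb, if_pos hp]
    · simp [hp]
  rw [Finset.sum_congr rfl h, sum_point n a _ ha, ← ite_and]

theorem sum_list_swap (A : Finset Nat) (sk : List (List Int)) (f : Nat → List Int → Int) :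
    (∑ i ∈ A, (sk.map (f i)).sum) = (sk.map (fun s => ∑ i ∈ A, f i s)).sum := by
  induction sk with
  | nil => simp
  | cons s sk ih => simp [Finset.sum_add_distrib, ih]

theorem sum2_effD (R C : Nat) (s : List Int) (hg : GoodSkill R C s) (r c : Nat) :
    (∑ i ∈ Finset.range (r + 1), ∑ j ∈ Finset.range (c + 1), effD s i j) =
      eff s (r : Int) (c : Int) := by
  obtain ⟨hlen, hbnd⟩ := hg
  obtain ⟨t, r1, c1, r2, c2, d, rfl⟩ := list_len6 s hlen
  simp only [List.getD_cons_zero, List.getD_cons_succ] at hbnd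
  by_cases htt : t = 1 ∨ t = 2
  · obtain ⟨hb1, hb2, hb3, hb4, hb5, hb6⟩ := hbnd htt
    simp only [effD, eff]
    rw [show (∑ i ∈ Finset.range (r + 1), ∑ j ∈ Finset.range (c + 1),
        ((if (i : Int) = r1 ∧ (j : Int) = c1 then dlt t d else 0)
          - (if (i : Int) = r1 ∧ (j : Int) = c2 + 1 then dlt t d else 0)
          - (if (i : Int) = r2 + 1 ∧ (j : Int) = c1 then dlt t d else 0)
          + (if (i : Int) = r2 + 1 ∧ (j : Int) = c2 + 1 then dlt t d else 0))) =
        (∑ i ∈ Finset.range (r + 1), ∑ j ∈ Finset.range (c + 1), (if (i : Int) = r1 ∧ (j : Int) = c1 then dlt t d else 0))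
        - (∑ i ∈ Finset.range (r + 1), ∑ j ∈ Finset.range (c + 1), (if (i : Int) = r1 ∧ (j : Int) = c2 + 1 then dlt t d else 0))
        - (∑ i ∈ Finset.range (r + 1), ∑ j ∈ Finset.range (c + 1), (if (i : Int) = r2 + 1 ∧ (j : Int) = c1 then dlt t d else 0))
        + (∑ i ∈ Finset.range (r + 1), ∑ j ∈ Finset.range (c + 1), (if (i : Int) = r2 + 1 ∧ (j : Int) = c2 + 1 then dlt t d else 0))
      from by simp [Finset.sum_add_distrib, Finset.sum_sub_distrib]]
    rw [sum2_point _ _ _ _ _ hb1 hb4, sum2_point _ _ _ _ _ hb1 (by omega),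
        sum2_point _ _ _ _ _ (by omega) hb4, sum2_point _ _ _ _ _ (by omega) (by omega)]
    have hr1 : ((r + 1 : Nat) : Int) = (r : Int) + 1 := by push_cast; ring
    have hc1 : ((c + 1 : Nat) : Int) = (c : Int) + 1 := by push_cast; ring
    rw [hr1, hc1]
    split_ifs <;> omega
  · have hdlt : dlt t d = 0 := by
      unfold dlt
      split_ifs <;> tauto
    simp [effD, eff, hdlt]

theorem eff_zero_ge (R C : Nat) (s : List Int) (hg : GoodSkill R C s) (ri ci : Int)
    (hci : (C : Int) ≤ ci) : eff s ri ci = 0 := by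
  obtain ⟨hlen, hbnd⟩ := hg
  obtain ⟨t, r1, c1, r2, c2, d, rfl⟩ := list_len6 s hlen
  simp only [List.getD_cons_zero, List.getD_cons_succ] at hbnd
  by_cases htt : t = 1 ∨ t = 2
  · obtain ⟨hb1, hb2, hb3, hb4, hb5, hb6⟩ := hbnd htt
    simp only [eff]
    rw [if_neg (by omega)]
  · have hdlt : dlt t d = 0 := by
      unfold dlt
      split_ifs <;> tauto
    simp [eff, hdlt]

theorem Shape_cum0 (R C : Nat) :
    Shape R C (List.replicate (R + 1) (List.replicate (C + 1) (0 : Int))) := by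
  refine ⟨by simp, fun i hi => ?_⟩
  rw [List.getD_eq_getElem?_getD, List.getElem?_replicate]
  simp [hi]

theorem Mg_cum0 (R C : Nat) (i j : Nat) :
    Mg (List.replicate (R + 1) (List.replicate (C + 1) (0 : Int))) i j = 0 := by
  unfold Mg
  have h1 : (List.replicate (R + 1) (List.replicate (C + 1) (0 : Int))).getD i [] =
      if i < R + 1 then List.replicate (C + 1) (0 : Int) else [] := by
    rw [List.getD_eq_getElem?_getD, List.getElem?_replicate]
    split_ifs <;> simp
  rw [h1]
  split_ifs
  · rw [List.getD_eq_getElem?_getD, List.getElem?_replicate]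
    split_ifs <;> simp
  · simp

theorem filterlen (p : Int → Bool) (row : List Int) :
    (((row.filter p).length : Nat) : Int) = (row.map (fun x => if p x then (1 : Int) else 0)).sum := by
  induction row with
  | nil => simp
  | cons x xs ih =>
    by_cases h : p x <;> simp [List.filter_cons, h, ih] <;> push_cast <;> ring

theorem listsum_index {α : Type} (f : α → Int) (l : List α) (d : α) :
    (l.map f).sum = ∑ i ∈ Finset.range l.length, f (l.getD i d) := by
  induction l with
  | nil => simp
  | cons x xs ih =>
    rw [List.map_cons, List.sum_cons, List.length_cons, Finset.sum_range_succ']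
    simp only [List.getD_cons_succ, List.getD_cons_zero]
    rw [← ih]
    ring


theorem foldl_pyRange_add (f : Nat → Int) (step : Int → Int → Int) (n : Nat)
    (hstep : ∀ (t : Int) (m : Nat), m < n → step t (m : Int) = t + f m) (t0 : Int) :
    (PySem.List.pyRange 0 (n : Int) 1).foldl step t0 = t0 + ∑ i ∈ Finset.range n, f i := by
  have key := foldl_pyRange_induct step (fun k t => t = t0 + ∑ i ∈ Finset.range k, f i)
    0 n (Nat.zero_le n) t0 (by simp) ?step
  · rw [show ((0 : Nat) : Int) = 0 from rfl] at key
    exact key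
  case step =>
    intro m t hm1 hm2 ht
    rw [hstep t m hm2, ht, Finset.sum_range_succ]
    ring

theorem cellVal_eq (skill : List (List Int)) (ri ci x : Int) :
    cellVal skill ri ci x = x + (skill.map (fun s => eff s ri ci)).sum := by
  induction skill generalizing x with
  | nil => simp [cellVal]
  | cons s sk ih =>
    simp only [cellVal, List.foldl_cons] at ih ⊢
    rw [ih, List.map_cons, List.sum_cons]
    have hstep : (match s with
        | [t, r1, c1, r2, c2, d] =>
          if r1 ≤ ri ∧ ri ≤ r2 ∧ c1 ≤ ci ∧ ci ≤ c2 then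
            if t = 1 then x - d else if t = 2 then x + d else x
          else x
        | _ => x) = x + eff s ri ci := by
      rcases s with _ | ⟨t, _ | ⟨a1, _ | ⟨a2, _ | ⟨a3, _ | ⟨a4, _ | ⟨a5, _ | ⟨a6, l⟩⟩⟩⟩⟩⟩⟩ <;>
        simp [eff, dlt] <;> split_ifs <;> ring
    rw [hstep]
    ring

theorem solution_eq (board skill : List (List Int)) (hpre : Pre_solution board skill) :
    solution board skill = solution_alt board skill := by
  obtain ⟨hne, hrowlen, hskpre⟩ := hpre
  have eqC : (PySem.List.pyGetD board 0 []).length = (board.headD []).length := by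
    cases board with
    | nil => exact absurd rfl hne
    | cons x l => simp [PySem.List.pyGetD_zero_cons]
  have R1 : 1 ≤ board.length := by
    cases board with
    | nil => exact absurd rfl hne
    | cons x l => simp
  simp only [solution, solution_alt]
  set R := board.length with hR
  set C := (PySem.List.pyGetD board 0 []).length with hCd
  have hsk : ∀ s ∈ skill, GoodSkill R C s := by
    intro s hs
    obtain ⟨h6, hb⟩ := hskpre s hs
    exact ⟨h6, fun ht => by
      obtain ⟨b1, b2, b3, b4, b5, b6⟩ := hb ht
      refine ⟨b1, b2, b3, b4, b5, ?_⟩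
      rw [show ((PySem.List.pyGetD board 0 []).length : Int) = ((board.headD []).length : Int) by rw [← hCd, eqC]]
      exact b6⟩
  have hrow' : ∀ i : Nat, i < R → C ≤ (board.getD i []).length := by
    intro i hi
    have hmem : board.getD i [] ∈ board := by
      rw [List.getD_eq_getElem?_getD, List.getElem?_eq_getElem hi]
      exact List.getElem_mem hi
    have := hrowlen _ hmem
    rw [eqC]
    exact this
  set cum1 := skill.foldl applySkill (List.replicate (R + 1) (List.replicate (C + 1) (0 : Int))) with hcum1
  set cum2 := (PySem.List.pyRange 0 (R : Int) 1).foldl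
    (fun g r => (PySem.List.pyRange 1 (C : Int) 1).foldl (fun g c => gAdd g r c (gGet g r (c - 1))) g) cum1 with hcum2
  set cum3 := (PySem.List.pyRange 0 (C : Int) 1).foldl
    (fun g c => (PySem.List.pyRange 1 (R : Int) 1).foldl (fun g r => gAdd g r c (gGet g (r - 1) c)) g) cum2 with hcum3
  set b2 := (PySem.List.pyRange 0 (R : Int) 1).foldl
    (fun b r => (PySem.List.pyRange 0 (C : Int) 1).foldl (fun b c => gAdd b r c (gGet cum3 r c)) b) board with hb2
  have sf := skillfold R C skill _ (Shape_cum0 R C) hsk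
  have rp := rowpass R C cum1 sf.1
  have cp := colpass R C R1 cum2 rp.1
  have ap := addpass R C cum3 board rfl hrow'
  have hcum3v : ∀ r c : Nat, r < R → c < C →
      Mg cum3 r c = (skill.map (fun s => eff s (r : Int) (c : Int))).sum := by
    intro r c hr hc
    rw [cp.2 r c (by omega) (by omega), if_pos ⟨hr, hc⟩]
    have h1 : ∀ i ∈ Finset.range (r + 1), Mg cum2 i c = ∑ j ∈ Finset.range (c + 1), Mg cum1 i j := by
      intro i hi
      have hi' := Finset.mem_range.mp hi
      rw [rp.2 i c (by omega) (by omega), if_pos ⟨by omega, hc⟩]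
    rw [Finset.sum_congr rfl h1,
        Finset.sum_congr rfl (fun i hi => Finset.sum_congr rfl (fun j hj => by
          have hi' := Finset.mem_range.mp hi
          have hj' := Finset.mem_range.mp hj
          rw [sf.2 i j (by omega) (by omega), Mg_cum0, zero_add])),
        Finset.sum_congr rfl (fun i _ => sum_list_swap (Finset.range (c + 1)) skill (fun j s => effD s i j)),
        sum_list_swap (Finset.range (r + 1)) skill (fun i s => ∑ j ∈ Finset.range (c + 1), effD s i j)]
    exact congrArg List.sum (List.map_congr_left (fun s hs => sum2_effD R C s (hsk s hs) r c))
  have cellkey : ∀ r c : Nat, r < R → c < (board.getD r []).length →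
      Mg b2 r c = cellVal skill (r : Int) (c : Int) ((board.getD r []).getD c 0) := by
    intro r c hr hc
    rw [cellVal_eq, ap.2.2 r c]
    by_cases hcC : c < C
    · rw [if_pos ⟨hr, hcC⟩, hcum3v r c hr hcC]
      rfl
    · rw [if_neg (by omega)]
      have hz : (skill.map (fun s => eff s (r : Int) (c : Int))).sum = 0 := by
        refine List.sum_eq_zero ?_
        intro x hx
        simp only [List.mem_map] at hx
        obtain ⟨s, hs, rfl⟩ := hx
        exact eff_zero_ge R C s (hsk s hs) _ _ (by omega)
      rw [hz]
      rfl
  -- B side to double sum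
  rw [foldl_pyRange_add
    (fun r => ∑ c ∈ Finset.range ((board.getD r []).length),
      (if cellVal skill (r : Int) (c : Int) ((board.getD r []).getD c 0) > 0 then (1 : Int) else 0))
    _ R ?outer 0]
  case outer =>
    intro t m hm
    simp only [PySem.List.pyGetD_natCast]
    rw [foldl_pyRange_add
      (fun c => (if cellVal skill (m : Int) (c : Int) ((board.getD m []).getD c 0) > 0 then (1 : Int) else 0))
      _ ((board.getD m []).length) ?inner t]
    case inner =>
      intro t' c hc
      simp only [PySem.List.pyGetD_natCast]
      split_ifs <;> ring
  -- A side to double sum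
  rw [listsum_index (fun row => (((row.filter (fun x => decide (x > 0))).length : Nat) : Int)) b2 []]
  rw [ap.1, hR]
  rw [zero_add]
  refine Finset.sum_congr rfl (fun r hr => ?_)
  have hrR := Finset.mem_range.mp hr
  rw [filterlen (fun x => decide (x > 0)) (b2.getD r []),
      listsum_index (fun x => if decide (x > 0) then (1 : Int) else 0) (b2.getD r []) 0,
      ap.2.1 r]
  refine Finset.sum_congr rfl (fun c hc => ?_)
  have hcL := Finset.mem_range.mp hc
  have hv : (b2.getD r []).getD c 0 = cellVal skill (r : Int) (c : Int) ((board.getD r []).getD c 0) :=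
    cellkey r c hrR hcL
  rw [hv]
  refine if_congr ?_ rfl rfl
  exact decide_eq_true_iff

-- ===== VERDICT (by name: the statement is the Claim_ definition above) =====
theorem solution_spec : Claim_equal_solution := by
  intro board skill _ hpre
  unfold Spec_solution
  exact solution_eq board skill hpre
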